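-- pv_equiv track=rewrite | github.com/El-Wally/Data-Encyption-algorithms | playfair.py | cleansInput
-- ===== SOURCE A (Python) =====
-- import string
--
-- def cleansInput(rawInput):
--     # up-case letters
--     # separate repeated letters with Xs
--
--     rawInput = ''.join([c.upper() for c in rawInput if c in string.ascii_letters])
--     cleanedInput = ""
--
--     if len(rawInput) < 2:
--         return rawInput
--
--     for i in range(len(rawInput)-1):
--         cleanedInput += rawInput[i]
--
--         if rawInput[i] == rawInput[i+1]:
--             cleanedInput += 'X'
--
--     cleanedInput += rawInput[-1] # last char is ignored as we check rawInput[i+1] for being X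
--
--     if len(cleanedInput) & 1: # if odd (first binary digit is one), Then append X
--         cleanedInput += 'X'
--
--     return cleanedInput
-- ===== SOURCE B (Python) =====
-- import string
-- from itertools import groupby
--
-- def cleansInput(rawInput):
--     s = ''.join(c.upper() for c in rawInput if c in string.ascii_letters)
--     if len(s) < 2:
--         return s
--     result = ''.join('X'.join(grp) for _, grp in groupby(s))
--     if len(result) & 1:
--         result += 'X'
--     return result
-- ===== Notes on version B (the rewrite author's own statement) =====
-- stated objective: idiomatic
-- what changed: Replaces the adjacent-index comparison loop with an itertools.groupby run decomposition: the pad letter is interspersed inside each maximal run of equal letters and the runs are concatenated.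
import Mathlib
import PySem

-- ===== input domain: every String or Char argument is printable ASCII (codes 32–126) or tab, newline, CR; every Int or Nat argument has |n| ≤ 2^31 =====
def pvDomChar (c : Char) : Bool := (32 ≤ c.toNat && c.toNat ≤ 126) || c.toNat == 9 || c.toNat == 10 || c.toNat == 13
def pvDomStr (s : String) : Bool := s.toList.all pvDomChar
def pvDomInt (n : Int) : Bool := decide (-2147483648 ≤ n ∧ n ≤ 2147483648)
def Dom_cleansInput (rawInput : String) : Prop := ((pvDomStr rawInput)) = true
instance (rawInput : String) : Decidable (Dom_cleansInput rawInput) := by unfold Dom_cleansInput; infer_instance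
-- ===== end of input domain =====

-- B replaces A's adjacent-index comparison loop with an itertools.groupby run decomposition
-- ('X' interspersed inside each maximal run of equal letters, runs concatenated); return values only.

-- shared by both Pythons: 'c in string.ascii_letters' (exact for any Char: membership in a-z/A-Z)
def pvIsAsciiLetter (c : Char) : Bool :=
  (97 ≤ c.toNat && c.toNat ≤ 122) || (65 ≤ c.toNat && c.toNat ≤ 90)

-- shared by both Pythons: c.upper(), applied only to ASCII letters (exact there)
def pvUp (c : Char) : Char :=
  if 97 ≤ c.toNat && c.toNat ≤ 122 then Char.ofNat (c.toNat - 32) else c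

-- ===== PORT A =====
-- the for-loop body over range(len(s)-1), accumulating cleanedInput
def cleansInputCore (s : List Char) : List Char :=
  if s.length < 2 then s
  else
    let body := (PySem.List.pyRange 0 ((s.length : Int) - 1) 1).foldl
      (fun acc i =>
        let acc := acc ++ [PySem.List.pyGetD s i ' ']
        if PySem.List.pyGetD s i ' ' == PySem.List.pyGetD s (i + 1) ' ' then acc ++ ['X'] else acc)
      []
    let body := body ++ [PySem.List.pyGetD s (-1) ' ']   -- cleanedInput += rawInput[-1]
    if body.length % 2 = 1 then body ++ ['X'] else body  -- len & 1

def cleansInput (rawInput : String) : String :=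
  String.ofList (cleansInputCore ((rawInput.toList.filter pvIsAsciiLetter).map pvUp))

-- ===== PORT B =====
-- itertools.groupby: maximal runs of equal characters
def pvRuns : List Char → List (List Char)
  | [] => []
  | c :: t => (c :: t.takeWhile (· == c)) :: pvRuns (t.dropWhile (· == c))
termination_by s => s.length
decreasing_by
  simp only [List.length_cons]
  exact Nat.lt_succ_of_le (List.length_dropWhile_le _ _)

def cleansInputAltCore (s : List Char) : List Char :=
  if s.length < 2 then s
  else
    let result := ((pvRuns s).map (List.intersperse 'X')).flatten  -- 'X'.join per run, concatenated
    if result.length % 2 = 1 then result ++ ['X'] else result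

def cleansInput_alt (rawInput : String) : String :=
  String.ofList (cleansInputAltCore ((rawInput.toList.filter pvIsAsciiLetter).map pvUp))

-- ===== PRECONDITION & SPEC =====
def Spec_cleansInput (rawInput : String) (out : String) : Prop := out = cleansInput_alt rawInput
instance (rawInput : String) (out : String) : Decidable (Spec_cleansInput rawInput out) := by unfold Spec_cleansInput; infer_instance

-- ===== CLAIM (what is proved, stated in full; the proofs are below) =====
def Claim_equal_cleansInput : Prop := ∀ (rawInput : String), Dom_cleansInput rawInput → Spec_cleansInput rawInput (cleansInput rawInput)

-- ===== LEMMAS AND PROOFS =====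

-- canonical form: 'X' inserted between each equal adjacent pair
def pvIns : List Char → List Char
  | [] => []
  | [a] => [a]
  | a :: b :: t => a :: (if a = b then 'X' :: pvIns (b :: t) else pvIns (b :: t))

theorem pvRuns_flatten_eq_ins (s : List Char) :
    ((pvRuns s).map (List.intersperse 'X')).flatten = pvIns s := by
  induction s using pvIns.induct with
  | case1 => simp [pvRuns, pvIns]
  | case2 a => simp [pvRuns, pvIns, List.intersperse]
  | case3 a b t ih =>
    by_cases hab : a = b
    · subst hab
      rw [pvRuns] at ih ⊢
      simp only [List.takeWhile_cons, List.dropWhile_cons, beq_self_eq_true, if_true,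
        List.map_cons, List.flatten_cons] at ih ⊢
      rw [show List.intersperse 'X' (a :: a :: List.takeWhile (· == a) t)
            = a :: 'X' :: List.intersperse 'X' (a :: List.takeWhile (· == a) t) from by
          simp [List.intersperse]]
      simp [pvIns, ← ih]
    · have hab' : (b == a) = false := by simp [beq_eq_false_iff_ne]; exact fun h => hab h.symm
      rw [pvRuns]
      simp only [List.takeWhile_cons, List.dropWhile_cons, hab',
        List.map_cons, List.flatten_cons]
      simp [pvIns, hab, ih]

theorem foldA (t : List Char) : ∀ (a : Char) (acc : List Char),
    ((List.range ((a :: t).length - 1)).foldl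
      (fun acc k =>
        if (a :: t).getD k ' ' == (a :: t).getD (k + 1) ' '
        then (acc ++ [(a :: t).getD k ' ']) ++ ['X']
        else acc ++ [(a :: t).getD k ' ']) acc)
      ++ [(a :: t).getLast (List.cons_ne_nil a t)] = acc ++ pvIns (a :: t) := by
  induction t with
  | nil => intro a acc; simp [pvIns]
  | cons b t' ih =>
    intro a acc
    have hlen : (a :: b :: t').length - 1 = t'.length + 1 := by simp
    rw [hlen, List.range_succ_eq_map, List.foldl_cons, List.foldl_map]
    simp only [List.getD_cons_zero, List.getD_cons_succ, Nat.succ_eq_add_one]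
    rw [List.getLast_cons (List.cons_ne_nil b t')]
    have ihb := ih b (if (a == b) = true then acc ++ [a] ++ ['X'] else acc ++ [a])
    simp only [List.getD_cons_succ] at ihb
    have hlen2 : (b :: t').length - 1 = t'.length := by simp
    rw [hlen2] at ihb
    rw [ihb]
    by_cases hab : a = b
    · subst hab; simp [pvIns]
    · have : (a == b) = false := by simp [hab]
      simp [pvIns, this, hab]

theorem core_eq (s : List Char) : cleansInputCore s = cleansInputAltCore s := by
  unfold cleansInputCore cleansInputAltCore
  by_cases h : s.length < 2
  · simp [h]
  · cases s with
    | nil => simp at h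
    | cons a t =>
      simp only [h, if_false]
      rw [PySem.List.pyRange_one]
      have hlen : (((a :: t).length : Int) - 1 - 0).toNat = (a :: t).length - 1 := by
        simp
      rw [hlen, List.foldl_map]
      rw [PySem.List.pyGetD_neg_one (a :: t) ' ' (List.cons_ne_nil a t)]
      simp only [zero_add, ← Nat.cast_add_one, PySem.List.pyGetD_natCast]
      rw [foldA t a [], pvRuns_flatten_eq_ins]
      simp

-- ===== VERDICT (by name: the statement is the Claim_ definition above) =====
theorem cleansInput_spec : Claim_equal_cleansInput := by
  intro rawInput _
  unfold Spec_cleansInput cleansInput cleansInput_alt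
  rw [core_eq]
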